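-- pv_equiv track=rewrite | github.com/GThibeault/algos | src/algorithms/shortest_path/path_builder.py | build_shortest_paths
-- ===== SOURCE A (Python) =====
-- from typing import List, Tuple, Union
--
-- def build_shortest_paths(predecessor: List[Union[int, None]]) -> List[Tuple[int, int]]:
--     paths = [[] for i in range(len(predecessor))]
--
--     for i in range(len(predecessor)):
--         p = predecessor[i]
--
--         while p is not None:
--             paths[i].insert(0, p)
--             p = predecessor[p]
--
--     return paths
-- ===== SOURCE B (Python) =====
-- from typing import List, Union
--
--
-- def build_shortest_paths(predecessor: List[Union[int, None]]) -> List[List[int]]: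
--     # Memoized path building: walk up the predecessor chain only until a node
--     # whose path is already known, recording the visited links, then fill the
--     # memo back down with memo[j] = memo[p] + [p]. Each link is resolved once.
--     memo = {}
--     for i in range(len(predecessor)):
--         chain = []
--         j = i
--         while j not in memo:
--             p = predecessor[j]
--             if p is None:
--                 memo[j] = []
--                 break
--             chain.append((j, p))
--             j = p
--         while chain:
--             j, p = chain.pop()
--             memo[j] = memo[p] + [p]
--     return [memo[i] for i in range(len(predecessor))]
-- ===== Notes on version B (the rewrite author's own statement) =====
-- stated objective: faster
-- what changed: Replaces A's full backward walk per node with insert(0, ...) by a memo table filled once per link: each node's path is built as memo[pred[j]] + [pred[j]] from its predecessor's finished path, so no chain is re-walked; Pre_ excludes only inputs on which A raises IndexError (an out-of-range predecessor) or never returns (a predecessor cycle).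
import Mathlib
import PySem

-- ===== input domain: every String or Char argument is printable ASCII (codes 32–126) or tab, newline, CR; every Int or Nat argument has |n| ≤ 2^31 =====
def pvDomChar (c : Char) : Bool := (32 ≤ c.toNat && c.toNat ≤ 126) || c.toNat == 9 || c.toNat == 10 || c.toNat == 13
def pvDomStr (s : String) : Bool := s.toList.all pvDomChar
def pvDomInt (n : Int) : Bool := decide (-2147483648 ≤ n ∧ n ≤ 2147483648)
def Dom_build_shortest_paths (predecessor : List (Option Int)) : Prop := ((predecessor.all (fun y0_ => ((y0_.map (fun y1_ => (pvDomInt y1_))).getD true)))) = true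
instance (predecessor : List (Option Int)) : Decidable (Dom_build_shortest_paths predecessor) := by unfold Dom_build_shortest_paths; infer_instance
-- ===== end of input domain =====

-- B replaces A's full backward chain walk per node (insert(0, ...)) by a memo
-- table filled once per link, memo[j] = memo[p] + [p] (objective: faster).

-- ===== PORT A =====
-- the 'while p is not None' loop of A; the fuel argument only makes the loop
-- total — under Pre_ every chain reaches None within len(predecessor) steps
def pvChainA (pred : List (Option Int)) : Nat → Option Int → List Int → List Int
  | 0, _, acc => acc
  | _ + 1, none, acc => acc
  | fuel + 1, some p, acc =>
      pvChainA pred fuel ((PySem.List.pyGet? pred p).getD none) (p :: acc)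

def build_shortest_paths (predecessor : List (Option Int)) : List (List Int) :=
  (List.range predecessor.length).map
    (fun i => pvChainA predecessor predecessor.length (predecessor.getD i none) [])

-- ===== PORT B =====
-- B's inner 'while j not in memo' walk, collecting the visited (j, p) links;
-- the fuel argument only makes the loop total — under Pre_ it ends within
-- len(predecessor)+1 iterations
def pvWalkB (pred : List (Option Int)) : Nat → Int → List (Int × Int) →
    PySem.Dict Int (List Int) → List (Int × Int) × PySem.Dict Int (List Int)
  | 0, _, chain, memo => (chain, memo)
  | fuel + 1, j, chain, memo =>
    match memo.get? j with
    | some _ => (chain, memo)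
    | none =>
      match (PySem.List.pyGet? pred j).getD none with
      | none => (chain, memo.insert j [])
      | some p => pvWalkB pred fuel p (chain ++ [(j, p)]) memo

-- B's 'while chain: j, p = chain.pop(); memo[j] = memo[p] + [p]' loop
def pvFillB (chain : List (Int × Int)) (memo : PySem.Dict Int (List Int)) :
    PySem.Dict Int (List Int) :=
  chain.reverse.foldl (fun m jp => m.insert jp.1 (m.getD jp.2 [] ++ [jp.2])) memo

-- B's outer 'for i in range(n)' loop building the memo table
def pvMemoB (predecessor : List (Option Int)) : PySem.Dict Int (List Int) :=
  (List.range predecessor.length).foldl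
    (fun (memo : PySem.Dict Int (List Int)) (i : Nat) =>
      let r := pvWalkB predecessor (predecessor.length + 1) (i : Int) [] memo
      pvFillB r.1 r.2)
    (PySem.Dict.empty : PySem.Dict Int (List Int))

def build_shortest_paths_alt (predecessor : List (Option Int)) : List (List Int) :=
  (List.range predecessor.length).map
    (fun (i : Nat) => (pvMemoB predecessor).getD (i : Int) [])

-- ===== PRECONDITION & SPEC =====
-- one application of 'p = predecessor[p]' (IndexError read as a stop; Pre_ rules it out)
def pvStep (pred : List (Option Int)) (o : Option Int) : Option Int :=
  o.bind (fun p => (PySem.List.pyGet? pred p).getD none)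

-- exactly A's domain: every stored predecessor is an in-range (possibly negative) index,
-- and every predecessor chain reaches None within len(predecessor) steps (no cycle);
-- outside it A raises IndexError or loops forever
def Pre_build_shortest_paths (predecessor : List (Option Int)) : Prop :=
  (∀ x ∈ PySem.List.enumerate predecessor 0, ∀ p ∈ x.2, PySem.Raise.InRange predecessor.length p) ∧
  (∀ i ∈ List.range predecessor.length, (pvStep predecessor)^[predecessor.length] (predecessor.getD i none) = none)
instance (predecessor : List (Option Int)) : Decidable (Pre_build_shortest_paths predecessor) := by unfold Pre_build_shortest_paths; infer_instance

def pvWitness_build_shortest_paths : List (Option Int) := [none, some 0, some 1, some (-4)]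

def Spec_build_shortest_paths (predecessor : List (Option Int)) (out : List (List Int)) : Prop := out = build_shortest_paths_alt predecessor
instance (predecessor : List (Option Int)) (out : List (List Int)) : Decidable (Spec_build_shortest_paths predecessor out) := by unfold Spec_build_shortest_paths; infer_instance

-- ===== CLAIM (what is proved, stated in full; the proofs are below) =====
def Claim_equal_build_shortest_paths : Prop := ∀ (predecessor : List (Option Int)), Dom_build_shortest_paths predecessor → Pre_build_shortest_paths predecessor → Spec_build_shortest_paths predecessor (build_shortest_paths predecessor)

-- ===== LEMMAS AND PROOFS =====

-- the value both programs compute for node j: A's chain walk with ample fuel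
def pvR (pred : List (Option Int)) (j : Int) : List Int :=
  pvChainA pred (pred.length + 1) ((PySem.List.pyGet? pred j).getD none) []

-- every memoised entry is the true path of its node
def pvValid (pred : List (Option Int)) (memo : PySem.Dict Int (List Int)) : Prop :=
  ∀ k v, memo.get? k = some v → v = pvR pred k

theorem pvChainA_none (pred : List (Option Int)) (fuel : Nat) (acc : List Int) :
    pvChainA pred fuel none acc = acc := by
  cases fuel <;> rfl

theorem pvChainA_acc (pred : List (Option Int)) :
    ∀ (fuel : Nat) (s : Option Int) (acc : List Int),
      pvChainA pred fuel s acc = pvChainA pred fuel s [] ++ acc := by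
  intro fuel
  induction fuel with
  | zero => intro s acc; rfl
  | succ f ih =>
    intro s acc
    cases s with
    | none => rfl
    | some p =>
      show pvChainA pred f _ (p :: acc) = pvChainA pred f _ [p] ++ acc
      rw [ih _ (p :: acc), ih _ [p]]
      simp

-- a chain that dies within k steps is insensitive to any fuel ≥ k
theorem pvChainA_fuel (pred : List (Option Int)) :
    ∀ (k : Nat) (x : Option Int), (pvStep pred)^[k] x = none →
      ∀ (f₁ f₂ : Nat), k ≤ f₁ → k ≤ f₂ → ∀ acc,
        pvChainA pred f₁ x acc = pvChainA pred f₂ x acc := by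
  intro k
  induction k with
  | zero =>
    intro x hx f₁ f₂ _ _ acc
    simp only [Function.iterate_zero, id] at hx
    subst hx
    rw [pvChainA_none, pvChainA_none]
  | succ k ih =>
    intro x hx f₁ f₂ h1 h2 acc
    cases x with
    | none => rw [pvChainA_none, pvChainA_none]
    | some p =>
      rw [Function.iterate_succ_apply] at hx
      obtain ⟨a, rfl⟩ : ∃ a, f₁ = a + 1 := ⟨f₁ - 1, by omega⟩
      obtain ⟨b, rfl⟩ : ∃ b, f₂ = b + 1 := ⟨f₂ - 1, by omega⟩
      show pvChainA pred a ((PySem.List.pyGet? pred p).getD none) (p :: acc)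
         = pvChainA pred b ((PySem.List.pyGet? pred p).getD none) (p :: acc)
      exact ih _ hx a b (by omega) (by omega) (p :: acc)

-- a node with predecessor None has the empty path
theorem pvR_none {pred : List (Option Int)} {j : Int}
    (hg : (PySem.List.pyGet? pred j).getD none = none) : pvR pred j = [] := by
  unfold pvR
  rw [hg, pvChainA_none]

-- the path of a node whose predecessor is p, from the path of node p
theorem pvR_step {pred : List (Option Int)} {j p : Int} {k : Nat}
    (hg : (PySem.List.pyGet? pred j).getD none = some p)
    (hiter : (pvStep pred)^[k] ((PySem.List.pyGet? pred p).getD none) = none)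
    (hk : k ≤ pred.length) :
    pvR pred j = pvR pred p ++ [p] := by
  unfold pvR
  rw [hg]
  show pvChainA pred (pred.length) ((PySem.List.pyGet? pred p).getD none) [p] = _
  rw [pvChainA_acc pred pred.length]
  rw [pvChainA_fuel pred k _ hiter pred.length (pred.length + 1) hk (by omega)]

-- inserting a correct entry keeps the memo valid
theorem pvValid_insert {pred : List (Option Int)} {memo : PySem.Dict Int (List Int)}
    (h : pvValid pred memo) {i : Int} {v : List Int} (hvv : v = pvR pred i) :
    pvValid pred (memo.insert i v) := by
  intro k w hk
  rw [PySem.Dict.get?_insert] at hk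
  by_cases hki : k = i
  · rw [if_pos hki] at hk
    cases hk
    rw [hvv, hki]
  · rw [if_neg hki] at hk
    exact h _ _ hk

-- the chain accumulator of the walk is a pure prefix
theorem pvWalkB_acc (pred : List (Option Int)) :
    ∀ (fuel : Nat) (j : Int) (chain : List (Int × Int)) (memo : PySem.Dict Int (List Int)),
      pvWalkB pred fuel j chain memo
        = (chain ++ (pvWalkB pred fuel j [] memo).1, (pvWalkB pred fuel j [] memo).2) := by
  intro fuel
  induction fuel with
  | zero => intro j chain memo; simp [pvWalkB]
  | succ f ih =>
    intro j chain memo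
    simp only [pvWalkB]
    rcases memo.get? j with _ | v
    · rcases (PySem.List.pyGet? pred j).getD none with _ | p
      · simp
      · simp only []
        rw [ih p (chain ++ [(j, p)]) memo, ih p ([] ++ [(j, p)]) memo]
        simp
    · simp

-- walk then fill: the memo stays valid, gains node j, and keeps its old keys
theorem pvWalkFill_correct {pred : List (Option Int)} :
    ∀ (k : Nat) (j : Int) (memo : PySem.Dict Int (List Int)), pvValid pred memo →
      (pvStep pred)^[k] ((PySem.List.pyGet? pred j).getD none) = none →
      k ≤ pred.length → ∀ (fuel : Nat), k < fuel →
      pvValid pred (pvFillB (pvWalkB pred fuel j [] memo).1 (pvWalkB pred fuel j [] memo).2) ∧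
      ((pvFillB (pvWalkB pred fuel j [] memo).1 (pvWalkB pred fuel j [] memo).2).get? j).isSome ∧
      (∀ key, (memo.get? key).isSome →
        ((pvFillB (pvWalkB pred fuel j [] memo).1 (pvWalkB pred fuel j [] memo).2).get? key).isSome) := by
  intro k
  induction k with
  | zero =>
    intro j memo hv hiter _ fuel hf
    obtain ⟨f, rfl⟩ : ∃ f, fuel = f + 1 := ⟨fuel - 1, by omega⟩
    simp only [Function.iterate_zero, id] at hiter
    rcases hmj : memo.get? j with _ | v
    · simp only [pvWalkB, hmj, hiter, pvFillB, List.reverse_nil, List.foldl_nil]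
      refine ⟨pvValid_insert hv (pvR_none hiter).symm, ?_, ?_⟩
      · rw [PySem.Dict.get?_insert_self]; simp
      · intro key hk
        by_cases hkj : key = j
        · subst hkj; rw [PySem.Dict.get?_insert_self]; simp
        · rw [PySem.Dict.get?_insert_of_ne _ _ hkj]; exact hk
    · simp only [pvWalkB, hmj, pvFillB, List.reverse_nil, List.foldl_nil]
      exact ⟨hv, by simp, fun key hk => hk⟩
  | succ k ih =>
    intro j memo hv hiter hk fuel hf
    obtain ⟨f, rfl⟩ : ∃ f, fuel = f + 1 := ⟨fuel - 1, by omega⟩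
    rcases hmj : memo.get? j with _ | v
    · rcases hg : (PySem.List.pyGet? pred j).getD none with _ | p
      · simp only [pvWalkB, hmj, hg, pvFillB, List.reverse_nil, List.foldl_nil]
        refine ⟨pvValid_insert hv (pvR_none hg).symm, ?_, ?_⟩
        · rw [PySem.Dict.get?_insert_self]; simp
        · intro key hkk
          by_cases hkj : key = j
          · subst hkj; rw [PySem.Dict.get?_insert_self]; simp
          · rw [PySem.Dict.get?_insert_of_ne _ _ hkj]; exact hkk
      · rw [Function.iterate_succ_apply] at hiter
        have hiter' : (pvStep pred)^[k] ((PySem.List.pyGet? pred p).getD none) = none := by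
          simpa [pvStep, hg] using hiter
        have hih := ih p memo hv hiter' (by omega) f (by omega)
        have hwalk : pvWalkB pred (f + 1) j [] memo
            = ((j, p) :: (pvWalkB pred f p [] memo).1, (pvWalkB pred f p [] memo).2) := by
          simp only [pvWalkB, hmj, hg, List.nil_append]
          rw [pvWalkB_acc pred f p [(j, p)] memo]
          simp
        rw [hwalk]
        set c := (pvWalkB pred f p [] memo).1
        set m := (pvWalkB pred f p [] memo).2
        have hfill : pvFillB ((j, p) :: c) m
            = (pvFillB c m).insert j ((pvFillB c m).getD p [] ++ [p]) := by
          simp [pvFillB, List.foldl_append]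
        obtain ⟨hval, hsome, hpres⟩ := hih
        obtain ⟨vp, hvp⟩ := Option.isSome_iff_exists.mp hsome
        have hvpR : vp = pvR pred p := hval _ _ hvp
        have hgd : (pvFillB c m).getD p [] = pvR pred p := by
          rw [PySem.Dict.getD_eq_get?_getD, hvp, hvpR]; rfl
        have hRj : pvR pred j = pvR pred p ++ [p] := pvR_step hg hiter' (by omega)
        rw [hfill]
        refine ⟨pvValid_insert hval (by rw [hgd, hRj]), ?_, ?_⟩
        · rw [PySem.Dict.get?_insert_self]; simp
        · intro key hkk
          by_cases hkj : key = j
          · subst hkj; rw [PySem.Dict.get?_insert_self]; simp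
          · rw [PySem.Dict.get?_insert_of_ne _ _ hkj]; exact hpres key hkk
    · simp only [pvWalkB, hmj, pvFillB, List.reverse_nil, List.foldl_nil]
      exact ⟨hv, by simp, fun key hkk => hkk⟩

-- for a nonnegative index, A's list read and the PySem read agree
theorem pv_get_conv (pred : List (Option Int)) (i : Nat) :
    (PySem.List.pyGet? pred (i : Int)).getD none = pred.getD i none := by
  rw [PySem.List.pyGet?_of_nonneg pred (by positivity), Int.toNat_natCast,
    List.getD_eq_getElem?_getD]

-- B's outer loop leaves a valid memo containing every processed node
theorem pvFold_inv {pred : List (Option Int)} (hpre : Pre_build_shortest_paths pred) :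
    ∀ (j : Nat), j ≤ pred.length →
      pvValid pred ((List.range j).foldl
        (fun (memo : PySem.Dict Int (List Int)) (i : Nat) =>
          let r := pvWalkB pred (pred.length + 1) (i : Int) [] memo
          pvFillB r.1 r.2) (PySem.Dict.empty : PySem.Dict Int (List Int))) ∧
      ∀ i < j, (((List.range j).foldl
        (fun (memo : PySem.Dict Int (List Int)) (i : Nat) =>
          let r := pvWalkB pred (pred.length + 1) (i : Int) [] memo
          pvFillB r.1 r.2) (PySem.Dict.empty : PySem.Dict Int (List Int))).get? (i : Int)).isSome := by
  intro j
  induction j with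
  | zero =>
    intro _
    simp only [List.range_zero, List.foldl_nil]
    constructor
    · intro k v hk
      rw [PySem.Dict.get?_empty] at hk
      exact absurd hk (by simp)
    · intro i hi; omega
  | succ j ih =>
    intro hj
    obtain ⟨hval, hkeys⟩ := ih (by omega)
    rw [List.range_succ, List.foldl_append]
    simp only [List.foldl_cons, List.foldl_nil]
    set memo := (List.range j).foldl
      (fun (memo : PySem.Dict Int (List Int)) (i : Nat) =>
        let r := pvWalkB pred (pred.length + 1) (i : Int) [] memo
        pvFillB r.1 r.2) (PySem.Dict.empty : PySem.Dict Int (List Int)) with hmemo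
    have hmem : j ∈ List.range pred.length := by rw [List.mem_range]; omega
    have hiter : (pvStep pred)^[pred.length] ((PySem.List.pyGet? pred (j : Int)).getD none) = none := by
      rw [pv_get_conv]; exact hpre.2 _ hmem
    have h := pvWalkFill_correct pred.length (j : Int) memo hval hiter (le_refl _)
      (pred.length + 1) (by omega)
    refine ⟨h.1, ?_⟩
    intro i hi
    by_cases hij : i = j
    · subst hij; exact h.2.1
    · exact h.2.2 _ (hkeys i (by omega))

-- ===== VERDICT (by name: the statement is the Claim_ definition above) =====
theorem build_shortest_paths_spec : Claim_equal_build_shortest_paths := by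
  intro pred _ hpre
  show build_shortest_paths pred = build_shortest_paths_alt pred
  obtain ⟨hval, hkeys⟩ := pvFold_inv hpre pred.length (le_refl _)
  unfold build_shortest_paths build_shortest_paths_alt pvMemoB
  apply List.map_congr_left
  intro i hi
  rw [List.mem_range] at hi
  obtain ⟨v, hv⟩ := Option.isSome_iff_exists.mp (hkeys i hi)
  rw [PySem.Dict.getD_eq_get?_getD, hv]
  have hvR : v = pvR pred (i : Int) := hval _ _ hv
  have hiter := hpre.2 _ (by rw [List.mem_range]; exact hi)
  rw [Option.getD_some, hvR]
  unfold pvR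
  rw [pv_get_conv]
  exact (pvChainA_fuel pred pred.length _ hiter (pred.length + 1) pred.length (by omega) (by omega) []).symm
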